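-- pv_equiv track=rewrite | github.com/rrwick/Verticall | phylo/distance.py | choose_window_size_and_step
-- ===== SOURCE A (Python) =====
-- def choose_window_size_and_step(cigars, target_window_count):
--     """
--     This function chooses an appropriate window size and step for the given CIGARs. It tries to
--     balance larger windows, which give higher-resolution identity samples, especially with
--     closely-related assemblies, and smaller windows, which allow for more identity samples.
--     """
--     window_step = 1000
--     while window_step > 1:
--         window_size = window_step * 100
--         if get_sliding_window_count(cigars, window_size, window_step) > target_window_count:
--             return window_size, window_step
--         window_step -= 1
--     return window_step * 100, window_step
--
-- def get_sliding_window_count(cigars, window_size, window_step):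
--     """
--     For a given window size, window step and set of CIGARs, this function returns how many windows
--     there will be in total.
--     """
--     count = 0
--     for cigar in cigars:
--         cigar_len = len(cigar)
--         if cigar_len < window_size:
--             continue
--         cigar_len -= window_size
--         count += 1
--         count += cigar_len // window_step
--     return count
-- ===== SOURCE B (Python) =====
-- def choose_window_size_and_step(cigars, target_window_count):
--     lengths = [len(c) for c in cigars]
--
--     def window_count(step):
--         size = 100 * step
--         return sum(1 + (length - size) // step for length in lengths if length >= size)
--
--     # window_count is antitone in step, so binary-search the largest step in
--     # [2, 1000] whose window count exceeds the target (fall back to step 1).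
--     lo, hi, best = 2, 1000, 1
--     while lo <= hi:
--         mid = (lo + hi) // 2
--         if window_count(mid) > target_window_count:
--             best, lo = mid, mid + 1
--         else:
--             hi = mid - 1
--     return best * 100, best
-- ===== Notes on version B (the rewrite author's own statement) =====
-- stated objective: faster
-- what changed: Replaces A's downward linear scan over all 999 candidate window steps (recomputing the sliding-window count from the cigar strings at each step) with a binary search over the step, valid because the window count is antitone in the step, on cigar lengths computed once.
import Mathlib
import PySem

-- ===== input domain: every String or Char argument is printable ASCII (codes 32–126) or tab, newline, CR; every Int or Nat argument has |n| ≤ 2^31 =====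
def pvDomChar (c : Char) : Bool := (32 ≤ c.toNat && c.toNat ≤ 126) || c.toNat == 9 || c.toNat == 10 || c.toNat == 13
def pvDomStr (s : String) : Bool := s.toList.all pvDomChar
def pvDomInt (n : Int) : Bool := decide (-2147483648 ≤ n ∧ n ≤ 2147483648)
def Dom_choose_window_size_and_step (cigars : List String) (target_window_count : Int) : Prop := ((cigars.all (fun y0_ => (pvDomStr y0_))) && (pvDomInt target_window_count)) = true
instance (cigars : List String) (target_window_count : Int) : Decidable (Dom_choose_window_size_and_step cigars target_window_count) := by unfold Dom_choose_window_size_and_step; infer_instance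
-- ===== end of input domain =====

-- B replaces A's downward linear scan over the 999 candidate steps by a binary search
-- (the window count is antitone in the step), with cigar lengths computed once.

-- ===== PORT A =====
-- get_sliding_window_count
def pvGswc (cigars : List String) (window_size window_step : Int) : Int :=
  cigars.foldl (fun count cigar =>
    let cigar_len := PySem.Str.len cigar
    if cigar_len < window_size then count
    else count + 1 + PySem.Int.floordiv (cigar_len - window_size) window_step) 0

-- the `while window_step > 1` loop of A (fuel = the initial step bounds the iteration count)
def pvLoopA (cigars : List String) (target : Int) : Nat → Int → Int × Int
  | 0, window_step => (window_step * 100, window_step)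
  | n + 1, window_step =>
    if 1 < window_step then
      -- window_size = window_step * 100
      if pvGswc cigars (window_step * 100) window_step > target then (window_step * 100, window_step)
      else pvLoopA cigars target n (window_step - 1)
    else (window_step * 100, window_step)

def choose_window_size_and_step (cigars : List String) (target_window_count : Int) : Int × Int :=
  pvLoopA cigars target_window_count 1000 1000

-- ===== PORT B =====
-- window_count(step) over the precomputed lengths
def pvWinCount (lengths : List Int) (step : Int) : Int :=
  ((lengths.filter (fun length => 100 * step ≤ length)).map
    (fun length => 1 + PySem.Int.floordiv (length - 100 * step) step)).sum

-- the `while lo <= hi` binary-search loop of B (fuel = hi + 1 - lo bounds the iteration count)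
def pvBsearch (lengths : List Int) (target : Int) : Nat → Int → Int → Int → Int
  | 0, _, _, best => best
  | n + 1, lo, hi, best =>
    if lo ≤ hi then
      -- mid = (lo + hi) // 2
      if pvWinCount lengths (PySem.Int.floordiv (lo + hi) 2) > target then
        pvBsearch lengths target n (PySem.Int.floordiv (lo + hi) 2 + 1) hi (PySem.Int.floordiv (lo + hi) 2)
      else pvBsearch lengths target n lo (PySem.Int.floordiv (lo + hi) 2 - 1) best
    else best

def choose_window_size_and_step_alt (cigars : List String) (target_window_count : Int) : Int × Int :=
  let lengths := cigars.map PySem.Str.len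
  let best := pvBsearch lengths target_window_count 999 2 1000 1
  (best * 100, best)

-- ===== PRECONDITION & SPEC =====
def Spec_choose_window_size_and_step (cigars : List String) (target_window_count : Int) (out : Int × Int) : Prop := out = choose_window_size_and_step_alt cigars target_window_count
instance (cigars : List String) (target_window_count : Int) (out : Int × Int) : Decidable (Spec_choose_window_size_and_step cigars target_window_count out) := by unfold Spec_choose_window_size_and_step; infer_instance

-- ===== CLAIM (what is proved, stated in full; the proofs are below) =====
def Claim_equal_choose_window_size_and_step : Prop := ∀ (cigars : List String) (target_window_count : Int), Dom_choose_window_size_and_step cigars target_window_count → Spec_choose_window_size_and_step cigars target_window_count (choose_window_size_and_step cigars target_window_count)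

-- ===== LEMMAS AND PROOFS =====

-- the test both programs perform at a given step
def pvHit (lengths : List Int) (target step : Int) : Prop := pvWinCount lengths step > target

-- characterisation of the common answer: the largest step in [2,1000] that hits, else 1
def pvIsAnswer (lengths : List Int) (target r : Int) : Prop :=
  (2 ≤ r ∧ r ≤ 1000 ∧ pvHit lengths target r ∧ ∀ t, r < t → t ≤ 1000 → ¬ pvHit lengths target t)
  ∨ (r = 1 ∧ ∀ t, 2 ≤ t → t ≤ 1000 → ¬ pvHit lengths target t)

theorem pvIsAnswer_unique {lengths : List Int} {target r r' : Int}
    (h : pvIsAnswer lengths target r) (h' : pvIsAnswer lengths target r') : r = r' := by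
  rcases h with ⟨h1, h2, h3, h4⟩ | ⟨h1, h2⟩ <;> rcases h' with ⟨g1, g2, g3, g4⟩ | ⟨g1, g2⟩
  · by_contra hne
    rcases lt_or_gt_of_ne hne with hlt | hgt
    · exact h4 r' hlt g2 g3
    · exact g4 r hgt h2 h3
  · exact absurd h3 (g2 r h1 h2)
  · exact absurd g3 (h2 r' g1 g2)
  · omega

-- unfolding of B's count on a cons cell
theorem pvWinCount_cons (L : Int) (ls : List Int) (s : Int) :
    pvWinCount (L :: ls) s =
      (if 100 * s ≤ L then 1 + PySem.Int.floordiv (L - 100 * s) s else 0) + pvWinCount ls s := by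
  by_cases h : 100 * s ≤ L
  · simp [pvWinCount, h]
  · simp [pvWinCount, h]

-- A's count equals B's count at size = step*100
theorem pvGswc_eq (cigars : List String) (step : Int) :
    pvGswc cigars (step * 100) step = pvWinCount (cigars.map PySem.Str.len) step := by
  have hc : step * 100 = 100 * step := by ring
  have key : ∀ (cs : List String) (acc : Int),
      cs.foldl (fun count cigar =>
        let cigar_len := PySem.Str.len cigar
        if cigar_len < 100 * step then count
        else count + 1 + PySem.Int.floordiv (cigar_len - 100 * step) step) acc
      = acc + pvWinCount (cs.map PySem.Str.len) step := by
    intro cs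
    induction cs with
    | nil => intro acc; simp [pvWinCount]
    | cons c cs ih =>
      intro acc
      simp only [List.foldl_cons, List.map_cons, pvWinCount_cons]
      rw [ih]
      split_ifs <;> omega
  unfold pvGswc
  rw [hc]
  simpa using key cigars 0

-- ediv is antitone in a positive divisor, for a nonneg dividend
theorem pvEdiv_anti {L s s' : Int} (hL : 0 ≤ L) (hs : 1 ≤ s) (hss' : s ≤ s') :
    L / s' ≤ L / s := by
  have hs' : (0:Int) < s' := by omega
  rw [Int.le_ediv_iff_mul_le (by omega : (0:Int) < s)]
  have h1 : L / s' * s' ≤ L := Int.ediv_mul_le L (by omega)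
  have hq : 0 ≤ L / s' := Int.ediv_nonneg hL (by omega)
  nlinarith

-- the window count is antitone in the step
theorem pvWinCount_anti {lengths : List Int} (hL : ∀ L ∈ lengths, 0 ≤ L)
    {s s' : Int} (hs : 1 ≤ s) (hss' : s ≤ s') :
    pvWinCount lengths s' ≤ pvWinCount lengths s := by
  induction lengths with
  | nil => simp [pvWinCount]
  | cons L ls ih =>
    have hL0 : 0 ≤ L := hL L (by simp)
    have ihc : pvWinCount ls s' ≤ pvWinCount ls s :=
      ih (fun x hx => hL x (by simp [hx]))
    rw [pvWinCount_cons, pvWinCount_cons]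
    have e1 : PySem.Int.floordiv (L - 100 * s') s' = L / s' - 100 := by
      rw [PySem.Int.floordiv_eq_ediv_of_pos (by omega)]
      have h : L - 100 * s' = L + (-100) * s' := by ring
      rw [h, Int.add_mul_ediv_right _ _ (by omega : s' ≠ 0)]
      ring
    have e2 : PySem.Int.floordiv (L - 100 * s) s = L / s - 100 := by
      rw [PySem.Int.floordiv_eq_ediv_of_pos (by omega)]
      have h : L - 100 * s = L + (-100) * s := by ring
      rw [h, Int.add_mul_ediv_right _ _ (by omega : s ≠ 0)]
      ring
    have hmono := pvEdiv_anti hL0 hs hss'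
    split_ifs with h' h
    · rw [e1, e2]; omega
    · exact absurd (by nlinarith : 100 * s ≤ L) h
    · have hnn : 0 ≤ PySem.Int.floordiv (L - 100 * s) s := by
        rw [PySem.Int.floordiv_eq_ediv_of_pos (by omega)]
        exact Int.ediv_nonneg (by omega) (by omega)
      omega
    · omega

-- hitting is downward closed in the step
theorem pvHit_anti {lengths : List Int} (hL : ∀ L ∈ lengths, 0 ≤ L) {target s s' : Int}
    (hs : 1 ≤ s) (hss' : s ≤ s') (h : pvHit lengths target s') : pvHit lengths target s := by
  have := pvWinCount_anti hL hs hss' (s := s) (s' := s')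
  unfold pvHit at h ⊢; omega

-- A's loop returns (r*100, r) for the characterised r
theorem pvLoopA_spec (cigars : List String) (target : Int) :
    ∀ (n : Nat) (s : Int), s.toNat ≤ n → 1 ≤ s → s ≤ 1000 →
    (∀ t, s < t → t ≤ 1000 → ¬ pvHit (cigars.map PySem.Str.len) target t) →
    ∃ r, pvLoopA cigars target n s = (r * 100, r) ∧ pvIsAnswer (cigars.map PySem.Str.len) target r := by
  intro n
  induction n with
  | zero => intro s hn hs1 _ _; exact absurd hs1 (by omega)
  | succ n ih =>
    intro s hn hs1 hs2 habove
    simp only [pvLoopA]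
    by_cases hgt : 1 < s
    · rw [if_pos hgt]
      by_cases hhit : pvGswc cigars (s * 100) s > target
      · rw [if_pos hhit]
        refine ⟨s, rfl, Or.inl ⟨by omega, hs2, ?_, habove⟩⟩
        unfold pvHit
        rw [← pvGswc_eq]
        exact hhit
      · rw [if_neg hhit]
        apply ih (s - 1) (by omega) (by omega) (by omega)
        intro t ht1 ht2
        by_cases hts : t = s
        · subst hts
          unfold pvHit
          rw [← pvGswc_eq]
          omega
        · exact habove t (by omega) ht2
    · rw [if_neg hgt]
      have hs1' : s = 1 := by omega
      subst hs1'
      exact ⟨1, rfl, Or.inr ⟨rfl, fun t ht1 ht2 => habove t (by omega) ht2⟩⟩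

-- B's binary search returns the characterised r
theorem pvBsearch_spec (lengths : List Int) (hL : ∀ L ∈ lengths, 0 ≤ L) (target : Int) :
    ∀ (n : Nat) (lo hi best : Int), (hi + 1 - lo).toNat ≤ n →
    2 ≤ lo → hi ≤ 1000 → lo ≤ hi + 1 → best = lo - 1 →
    (best = 1 ∨ pvHit lengths target best) →
    (∀ t, hi < t → t ≤ 1000 → ¬ pvHit lengths target t) →
    pvIsAnswer lengths target (pvBsearch lengths target n lo hi best) := by
  intro n
  induction n with
  | zero =>
    intro lo hi best hn hlo hhi hlohi hbest hbw habove
    simp only [pvBsearch]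
    have hfin : lo = hi + 1 := by omega
    rcases hbw with hb1 | hbhit
    · exact Or.inr ⟨hb1, fun t ht1 ht2 => habove t (by omega) ht2⟩
    · by_cases h2 : 2 ≤ best
      · exact Or.inl ⟨h2, by omega, hbhit, fun t ht1 ht2 => habove t (by omega) ht2⟩
      · exact Or.inr ⟨by omega, fun t ht1 ht2 => habove t (by omega) ht2⟩
  | succ n ih =>
    intro lo hi best hn hlo hhi hlohi hbest hbw habove
    simp only [pvBsearch]
    by_cases hle : lo ≤ hi
    · rw [if_pos hle]
      have hmid := PySem.Int.floordiv_two_mid_bounds (lo := lo) (hi := hi) hle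
      set mid := PySem.Int.floordiv (lo + hi) 2 with hmiddef
      by_cases hhit : pvWinCount lengths mid > target
      · rw [if_pos hhit]
        exact ih (mid + 1) hi mid (by omega)
          (by omega) hhi (by omega) (by omega) (Or.inr hhit) habove
      · rw [if_neg hhit]
        apply ih lo (mid - 1) best (by omega)
          hlo (by omega) (by omega) hbest hbw
        intro t ht1 ht2
        by_cases htm : t ≤ mid
        · have htm' : t = mid := by omega
          subst htm'
          unfold pvHit; omega
        · by_cases hthi : t ≤ hi
          · -- mid < t ≤ hi: if t hit, mid would hit by antitonicity
            intro hcon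
            exact hhit (pvHit_anti hL (by omega) (by omega) hcon)
          · exact habove t (by omega) ht2
    · rw [if_neg hle]
      have hfin : lo = hi + 1 := by omega
      rcases hbw with hb1 | hbhit
      · exact Or.inr ⟨hb1, fun t ht1 ht2 => habove t (by omega) ht2⟩
      · by_cases h2 : 2 ≤ best
        · exact Or.inl ⟨h2, by omega, hbhit, fun t ht1 ht2 => habove t (by omega) ht2⟩
        · exact Or.inr ⟨by omega, fun t ht1 ht2 => habove t (by omega) ht2⟩

-- ===== VERDICT (by name: the statement is the Claim_ definition above) =====
theorem choose_window_size_and_step_spec : Claim_equal_choose_window_size_and_step := by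
  intro cigars target _hdom
  unfold Spec_choose_window_size_and_step choose_window_size_and_step choose_window_size_and_step_alt
  have hL : ∀ L ∈ cigars.map PySem.Str.len, 0 ≤ L := by
    intro L hmem
    rcases List.mem_map.mp hmem with ⟨c, _, rfl⟩
    simp [PySem.Str.len_eq]
  obtain ⟨r, hr, hra⟩ := pvLoopA_spec cigars target 1000 1000 (by omega) (by omega) (by omega)
    (fun t ht1 ht2 => absurd ht2 (by omega))
  have hb := pvBsearch_spec (cigars.map PySem.Str.len) hL target 999 2 1000 1 (by omega)
    (by omega) (by omega) (by omega) (by omega) (Or.inl rfl)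
    (fun t ht1 ht2 => absurd ht2 (by omega))
  have := pvIsAnswer_unique hra hb
  rw [hr, this]
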